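-- pv_equiv track=rewrite | github.com/tweirick/okstate_bioinformatics_command_line_programs | fasta_manipulation_programs/fasta_x_remover.py | format_fasta
-- ===== SOURCE A (Python) =====
-- MAX_CHARS_PER_LINE = 80
--
-- def format_fasta(data):
--     i=0
--     if type(data) == list:
--         data = ''.join(data)
--
--     rtn_list = list()
--     data = data.replace('\n', '')
--
--     for e in data:
--         if (i%MAX_CHARS_PER_LINE == 0 and i!=0):
--             rtn_list.append('\n')
--         rtn_list.append(e)
--         i+=1
--     rtn_list.append('\n')
--     return ''.join(rtn_list)
-- ===== SOURCE B (Python) =====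
-- def format_fasta(data):
--     if type(data) == list:
--         data = ''.join(data)
--     s = data.replace('\n', '')
--     chunks = []
--     while s:
--         chunks.append(s[:80])
--         s = s[80:]
--     return '\n'.join(chunks) + '\n'
-- ===== Notes on version B (the rewrite author's own statement) =====
-- stated objective: idiomatic
-- what changed: Replaces the per-character loop with a modulo counter and per-element appends by a per-chunk loop that slices 80-character blocks off the cleaned string and joins them with newline separators.
import Mathlib
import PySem

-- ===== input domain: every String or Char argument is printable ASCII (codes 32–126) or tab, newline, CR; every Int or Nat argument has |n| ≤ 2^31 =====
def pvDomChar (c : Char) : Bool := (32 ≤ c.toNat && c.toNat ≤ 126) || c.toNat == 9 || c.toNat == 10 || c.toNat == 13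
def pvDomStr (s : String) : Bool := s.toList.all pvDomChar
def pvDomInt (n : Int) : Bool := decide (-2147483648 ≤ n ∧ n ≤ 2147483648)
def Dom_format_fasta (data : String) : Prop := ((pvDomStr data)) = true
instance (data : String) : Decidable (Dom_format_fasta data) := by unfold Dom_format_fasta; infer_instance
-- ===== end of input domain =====

-- B rewrites A's per-character counting loop as a per-chunk loop slicing 80-char blocks and joining them (idiomatic; same cost).
-- (A's 'type(data) == list' branch is vacuous for a String argument and is omitted in both ports.)

-- ===== PORT A =====
-- the for-loop body over the cleaned string: state = (rtn_list, i)
def pvStepA (st : List Char × Int) (e : Char) : List Char × Int :=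
  ((if st.2 % 80 = 0 ∧ st.2 ≠ 0 then st.1 ++ ['\n'] else st.1) ++ [e], st.2 + 1)

def format_fasta (data : String) : String :=
  let data := PySem.Str.replace data "\n" ""
  let st := data.toList.foldl pvStepA ([], 0)
  String.ofList (st.1 ++ ['\n'])

-- ===== PORT B =====
-- the while loop: chunks.append(s[:80]); s = s[80:]  (the slices s[:80] / s[80:] with these
-- nonnegative bounds are exactly take 80 / drop 80)
def pvChunks : List Char → List (List Char)
  | [] => []
  | x :: xs => (x :: xs).take 80 :: pvChunks ((x :: xs).drop 80)
  termination_by l => l.length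
  decreasing_by simp [List.length_drop]

def format_fasta_alt (data : String) : String :=
  let s := PySem.Str.replace data "\n" ""
  String.ofList (PySem.Chars.join ['\n'] (pvChunks s.toList) ++ ['\n'])

-- ===== PRECONDITION & SPEC =====
def Spec_format_fasta (data : String) (out : String) : Prop := out = format_fasta_alt data
instance (data : String) (out : String) : Decidable (Spec_format_fasta data out) := by unfold Spec_format_fasta; infer_instance

-- ===== CLAIM (what is proved, stated in full; the proofs are below) =====
def Claim_equal_format_fasta : Prop := ∀ (data : String), Dom_format_fasta data → Spec_format_fasta data (format_fasta data)

-- ===== LEMMAS AND PROOFS =====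

-- A's loop, written as structural recursion on the characters with the counter in Nat view
def pvEmit : Nat → List Char → List Char
  | _, [] => []
  | c, x :: xs => (if c % 80 = 0 ∧ c ≠ 0 then ['\n'] else []) ++ x :: pvEmit (c + 1) xs

theorem pvFoldA (l : List Char) : ∀ (acc : List Char) (c : Nat),
    (l.foldl pvStepA (acc, (c : Int))).1 = acc ++ pvEmit c l := by
  induction l with
  | nil => intro acc c; simp [pvEmit]
  | cons x xs ih =>
    intro acc c
    have hc : ((c : Int) % 80 = 0 ∧ (c : Int) ≠ 0) ↔ (c % 80 = 0 ∧ c ≠ 0) := by omega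
    have hcast : ((c : Int) + 1) = ((c + 1 : Nat) : Int) := by push_cast; ring
    simp only [List.foldl_cons, pvStepA]
    rw [hcast, ih]
    by_cases h : c % 80 = 0 ∧ c ≠ 0
    · rw [if_pos (hc.mpr h), pvEmit, if_pos h]; simp
    · rw [if_neg (fun hh => h (hc.mp hh)), pvEmit, if_neg h]; simp

theorem pvEmit_append (a b : List Char) : ∀ c, pvEmit c (a ++ b) = pvEmit c a ++ pvEmit (c + a.length) b := by
  induction a with
  | nil => simp [pvEmit]
  | cons x xs ih =>
    intro c
    simp only [List.cons_append, pvEmit, ih (c + 1), List.length_cons]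
    have h80 : c + 1 + xs.length = c + (xs.length + 1) := by omega
    rw [h80]
    by_cases h : c % 80 = 0 ∧ c ≠ 0 <;> simp [h]

theorem pvEmit_run : ∀ (l : List Char) (c : Nat), c % 80 ≠ 0 → c % 80 + l.length ≤ 80 → pvEmit c l = l := by
  intro l
  induction l with
  | nil => intro c _ _; rfl
  | cons x xs ih =>
    intro c h1 h2
    simp only [List.length_cons] at h2
    have hnot : ¬ (c % 80 = 0 ∧ c ≠ 0) := by omega
    rw [pvEmit, if_neg hnot, List.nil_append]
    congr 1
    rcases xs with _ | ⟨y, ys⟩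
    · rfl
    · have hlen : (y :: ys).length = ys.length + 1 := by simp
      apply ih
      · omega
      · omega

theorem pvMain : ∀ (n : Nat) (l : List Char), l.length ≤ n → ∀ c, c % 80 = 0 →
    pvEmit c l = (if c ≠ 0 ∧ l ≠ [] then ['\n'] else []) ++ PySem.Chars.join ['\n'] (pvChunks l) := by
  intro n
  induction n with
  | zero =>
    intro l hl c _
    have hnil : l = [] := by cases l <;> simp_all
    subst hnil; simp [pvEmit, pvChunks, PySem.Chars.join_nil]
  | succ n ih =>
    intro l hl c hc
    rcases l with _ | ⟨x, xs⟩
    · simp [pvEmit, pvChunks, PySem.Chars.join_nil]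
    have hchunk : pvChunks (x :: xs) = (x :: xs).take 80 :: pvChunks ((x :: xs).drop 80) := by
      rw [pvChunks]
    by_cases hlen : xs.length ≤ 79
    · -- the whole list is one chunk
      have h1 : pvEmit (c + 1) xs = xs := by
        rcases xs with _ | ⟨y, ys⟩
        · rfl
        · have hl2 : (y :: ys).length = ys.length + 1 := by simp
          simp only [List.length_cons] at hlen
          apply pvEmit_run <;> omega
      have hdrop : (x :: xs).drop 80 = [] := by
        apply List.drop_eq_nil_of_le; simp; omega
      have htake : (x :: xs).take 80 = x :: xs := by
        apply List.take_of_length_le; simp; omega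
      rw [pvEmit, h1, hchunk, hdrop, htake]
      simp only [pvChunks, PySem.Chars.join_singleton]
      have hcond : (c % 80 = 0 ∧ c ≠ 0) ↔ (c ≠ 0 ∧ x :: xs ≠ []) := by
        simp [hc]
      by_cases h : c ≠ 0 ∧ x :: xs ≠ []
      · rw [if_pos (hcond.mpr h), if_pos h]
      · rw [if_neg (fun hh => h (hcond.mp hh)), if_neg h]
    · -- first chunk, then the rest by induction
      replace hlen : 79 < xs.length := by omega
      have hxs : xs = xs.take 79 ++ xs.drop 79 := (List.take_append_drop 79 xs).symm
      have hlen79 : (xs.take 79).length = 79 := by simp; omega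
      have h2 : pvEmit (c + 1) xs = xs.take 79 ++ pvEmit (c + 80) (xs.drop 79) := by
        conv_lhs => rw [hxs]
        rw [pvEmit_append, hlen79]
        have h79 : c + 1 + 79 = c + 80 := by omega
        rw [h79]
        congr 1
        apply pvEmit_run
        · omega
        · rw [hlen79]; omega
      have hdrop : xs.drop 79 = (x :: xs).drop 80 := by simp
      have hlt : ((x :: xs).drop 80).length ≤ n := by
        simp only [List.length_drop, List.length_cons] at *; omega
      have hne : (x :: xs).drop 80 ≠ [] := by
        have hld : ((x :: xs).drop 80).length = xs.length - 79 := by simp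
        intro h; rw [h] at hld; simp at hld; omega
      have ihd := ih ((x :: xs).drop 80) hlt (c + 80) (by omega)
      rw [if_pos ⟨by omega, hne⟩] at ihd
      have htake : (x :: xs).take 80 = x :: xs.take 79 := by simp
      obtain ⟨b, bs, hch⟩ : ∃ b bs, pvChunks ((x :: xs).drop 80) = b :: bs := by
        rcases hd : (x :: xs).drop 80 with _ | ⟨z, zs⟩
        · exact absurd hd hne
        · exact ⟨_, _, by rw [pvChunks]⟩
      rw [pvEmit, h2, hdrop, ihd, hchunk, htake, hch, PySem.Chars.join_cons_cons]
      have hcpos : c % 80 = 0 ∧ c ≠ 0 ↔ c ≠ 0 := by simp [hc]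
      by_cases h : c ≠ 0
      · rw [if_pos (hcpos.mpr h), if_pos ⟨h, by simp⟩]; simp
      · rw [if_neg (fun hh => h (hcpos.mp hh)), if_neg (fun hh => h hh.1)]; simp

theorem pvEmit_zero (l : List Char) : pvEmit 0 l = PySem.Chars.join ['\n'] (pvChunks l) := by
  have h := pvMain l.length l le_rfl 0 (by omega)
  simpa using h

-- ===== VERDICT (by name: the statement is the Claim_ definition above) =====
theorem format_fasta_spec : Claim_equal_format_fasta := by
  intro data _
  unfold Spec_format_fasta format_fasta format_fasta_alt
  have h := pvFoldA (PySem.Str.replace data "\n" "").toList [] 0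
  simp only [Int.ofNat_zero] at h
  simp only [h, pvEmit_zero, List.nil_append]
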